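-- pv_equiv track=rewrite | github.com/NSO-developer/nso-docker | version-includes/gen.py | f_tot
-- ===== SOURCE A (Python) =====
-- def f_tot(versions):
--     """Filter based on tip-of-train
--     Version numbers are major.minor.maintenance.path
--     Tip-of-train is considered to be the latest major.minor.maintenance combo
--     This filter will only return the tip-of-train releases so for example, only
--     4.7.6 will be released if the input is 4.7.5 and 4.7.6
--     """
--     tot = {}
--     for version in versions:
--         mm = (version[0], version[1])
--         if mm not in tot:
--             tot[mm] = version
--         if tot[mm] < version:
--             tot[mm] = version
--     return tot.values()
-- ===== SOURCE B (Python) =====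
-- def f_tot(versions):
--     """Bucket versions by (major, minor), then reduce each bucket to its max."""
--     groups = {}
--     for version in versions:
--         groups.setdefault((version[0], version[1]), []).append(version)
--     return {mm: max(g) for mm, g in groups.items()}.values()
-- ===== Notes on version B (the rewrite author's own statement) =====
-- stated objective: alternative
-- what changed: Replaces the single-pass running-max dict update with a bucket-then-reduce decomposition: first group versions into per-(major,minor) lists with setdefault, then take max(g) of each group in a dict comprehension.
import Mathlib
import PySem

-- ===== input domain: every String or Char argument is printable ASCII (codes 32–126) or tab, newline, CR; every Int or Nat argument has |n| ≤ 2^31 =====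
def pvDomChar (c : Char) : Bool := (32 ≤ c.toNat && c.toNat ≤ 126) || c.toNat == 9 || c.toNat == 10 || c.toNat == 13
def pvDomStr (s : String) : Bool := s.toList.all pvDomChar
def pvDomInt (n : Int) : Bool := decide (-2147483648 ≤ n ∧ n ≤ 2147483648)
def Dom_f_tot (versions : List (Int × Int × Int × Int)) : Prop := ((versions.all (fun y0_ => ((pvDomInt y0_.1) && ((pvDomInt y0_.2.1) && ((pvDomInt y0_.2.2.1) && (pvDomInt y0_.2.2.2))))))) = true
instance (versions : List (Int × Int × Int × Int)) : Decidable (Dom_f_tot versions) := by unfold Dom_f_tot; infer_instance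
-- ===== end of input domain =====

-- B replaces A's single-pass running-max dict update by a bucket-then-reduce decomposition
-- (group versions per (major, minor), then take the max of each group); alternative, same cost.


-- Python's strict lexicographic `<` on 4-tuples of ints (exact).
def pvLt4 (a b : Int × Int × Int × Int) : Bool :=
  decide (a.1 < b.1) || (a.1 == b.1 && (decide (a.2.1 < b.2.1) || (a.2.1 == b.2.1 &&
    (decide (a.2.2.1 < b.2.2.1) || (a.2.2.1 == b.2.2.1 && decide (a.2.2.2 < b.2.2.2))))))

-- ===== PORT A =====
-- loop body of A: `mm = (version[0], version[1]); if mm not in tot: tot[mm] = version; if tot[mm] < version: tot[mm] = version`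
def pvStepA (tot : PySem.Dict (Int × Int) (Int × Int × Int × Int)) (version : Int × Int × Int × Int) :
    PySem.Dict (Int × Int) (Int × Int × Int × Int) :=
  let mm := (version.1, version.2.1)
  let tot1 := if tot.contains mm then tot else tot.insert mm version
  match tot1.get? mm with
  | some cur => if pvLt4 cur version then tot1.insert mm version else tot1
  | none => tot1

def f_tot (versions : List (Int × Int × Int × Int)) : List (Int × Int × Int × Int) :=
  (versions.foldl pvStepA PySem.Dict.empty).values

-- ===== PORT B =====
-- Python `max` on a list of int 4-tuples (lexicographic, first maximal wins); B only calls it on nonempty groups.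
def pvMax (l : List (Int × Int × Int × Int)) : Int × Int × Int × Int :=
  match l with
  | [] => (0, 0, 0, 0)
  | h :: t => t.foldl (fun m x => if pvLt4 m x then x else m) h

-- loop body of B: `groups.setdefault((version[0], version[1]), []).append(version)`
def pvStepB (g : PySem.Dict (Int × Int) (List (Int × Int × Int × Int))) (version : Int × Int × Int × Int) :
    PySem.Dict (Int × Int) (List (Int × Int × Int × Int)) :=
  PySem.Dict.modify g (version.1, version.2.1) [] (fun l => l ++ [version])

def f_tot_alt (versions : List (Int × Int × Int × Int)) : List (Int × Int × Int × Int) :=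
  let groups := versions.foldl pvStepB PySem.Dict.empty
  -- `{mm: max(g) for mm, g in groups.items()}.values()`
  (groups.items.foldl (fun d p => d.insert p.1 (pvMax p.2)) PySem.Dict.empty).values

-- ===== PRECONDITION & SPEC =====
def Spec_f_tot (versions : List (Int × Int × Int × Int)) (out : List (Int × Int × Int × Int)) : Prop := out = f_tot_alt versions
instance (versions : List (Int × Int × Int × Int)) (out : List (Int × Int × Int × Int)) : Decidable (Spec_f_tot versions out) := by unfold Spec_f_tot; infer_instance

-- ===== CLAIM (what is proved, stated in full; the proofs are below) =====
def Claim_equal_f_tot : Prop := ∀ (versions : List (Int × Int × Int × Int)), Dom_f_tot versions → Spec_f_tot versions (f_tot versions)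

-- ===== LEMMAS AND PROOFS =====

-- Invariant: A's running dict holds exactly the max of each of B's groups, same keys in the same order.
def pvR (d : PySem.Dict (Int × Int) (Int × Int × Int × Int))
    (g : PySem.Dict (Int × Int) (List (Int × Int × Int × Int))) : Prop :=
  d.keys = g.keys ∧ d.keys.Nodup ∧
  ∀ k gl, g.get? k = some gl → gl ≠ [] ∧ d.get? k = some (pvMax gl)

lemma pvLt4_irrefl (a : Int × Int × Int × Int) : pvLt4 a a = false := by
  simp [pvLt4]

lemma pvMax_append (gl : List (Int × Int × Int × Int)) (h : gl ≠ []) (v : Int × Int × Int × Int) :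
    pvMax (gl ++ [v]) = if pvLt4 (pvMax gl) v then v else pvMax gl := by
  cases gl with
  | nil => exact absurd rfl h
  | cons a t => simp [pvMax, List.foldl_append]

lemma pvStep_pres (d : PySem.Dict (Int × Int) (Int × Int × Int × Int))
    (g : PySem.Dict (Int × Int) (List (Int × Int × Int × Int)))
    (h : pvR d g) (v : Int × Int × Int × Int) : pvR (pvStepA d v) (pvStepB g v) := by
  obtain ⟨hk, hnd, hget⟩ := h
  have hcd : d.contains (v.1, v.2.1) = g.contains (v.1, v.2.1) := by
    rw [PySem.Dict.contains_eq_decide_mem_keys, PySem.Dict.contains_eq_decide_mem_keys, hk]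
  by_cases hc : g.contains (v.1, v.2.1) = true
  · have hdC : d.contains (v.1, v.2.1) = true := by rw [hcd]; exact hc
    have hsome : (g.get? (v.1, v.2.1)).isSome := by
      rw [← PySem.Dict.contains_eq_isSome_get?]; exact hc
    obtain ⟨gl, hgl⟩ := Option.isSome_iff_exists.mp hsome
    obtain ⟨hne, hdmm⟩ := hget _ gl hgl
    have hB : pvStepB g v = g.insert (v.1, v.2.1) (gl ++ [v]) := by
      simp [pvStepB, PySem.Dict.modify, PySem.Dict.getD_eq_get?_getD, hgl]
    have hA : pvStepA d v =
        if pvLt4 (pvMax gl) v then d.insert (v.1, v.2.1) v else d := by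
      simp [pvStepA, hdC, hdmm]
    refine ⟨?_, ?_, ?_⟩
    · rw [hA, hB, PySem.Dict.keys_insert_of_contains _ _ hc]
      split
      · rw [PySem.Dict.keys_insert_of_contains _ _ hdC]; exact hk
      · exact hk
    · rw [hA]; split
      · rw [PySem.Dict.keys_insert_of_contains _ _ hdC]; exact hnd
      · exact hnd
    · intro k gl' hget'
      rw [hB, PySem.Dict.get?_insert] at hget'
      by_cases hkmm : k = (v.1, v.2.1)
      · rw [if_pos hkmm] at hget'
        obtain rfl : gl ++ [v] = gl' := Option.some.inj hget'
        refine ⟨by simp, ?_⟩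
        rw [hA, pvMax_append gl hne v]
        split
        · subst hkmm; rw [PySem.Dict.get?_insert_self]
        · subst hkmm; exact hdmm
      · rw [if_neg hkmm] at hget'
        obtain ⟨hne', hd'⟩ := hget _ _ hget'
        refine ⟨hne', ?_⟩
        rw [hA]; split
        · rw [PySem.Dict.get?_insert_of_ne _ _ hkmm]; exact hd'
        · exact hd'
  · have hcF : g.contains (v.1, v.2.1) = false := by simpa using hc
    have hdF : d.contains (v.1, v.2.1) = false := by rw [hcd]; exact hcF
    have hB : pvStepB g v = g.insert (v.1, v.2.1) [v] := by
      simp [pvStepB, PySem.Dict.modify, PySem.Dict.getD_of_not_contains _ _ hcF]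
    have hA : pvStepA d v = d.insert (v.1, v.2.1) v := by
      simp [pvStepA, hdF, PySem.Dict.get?_insert_self, pvLt4_irrefl]
    have hmem : (v.1, v.2.1) ∉ d.keys := by
      rw [PySem.Dict.contains_eq_decide_mem_keys] at hdF
      simpa using hdF
    refine ⟨?_, ?_, ?_⟩
    · rw [hA, hB, PySem.Dict.keys_insert_of_not_contains _ _ hcF,
        PySem.Dict.keys_insert_of_not_contains _ _ hdF, hk]
    · rw [hA, PySem.Dict.keys_insert_of_not_contains _ _ hdF]
      simp [List.nodup_append, hnd]
      intro a b hab h1 h2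
      rw [h1, h2] at hab
      exact hmem hab
    · intro k gl' hget'
      rw [hB, PySem.Dict.get?_insert] at hget'
      by_cases hkmm : k = (v.1, v.2.1)
      · rw [if_pos hkmm] at hget'
        obtain rfl : [v] = gl' := Option.some.inj hget'
        subst hkmm
        exact ⟨by simp, by rw [hA, PySem.Dict.get?_insert_self]; rfl⟩
      · rw [if_neg hkmm] at hget'
        obtain ⟨hne', hd'⟩ := hget _ _ hget'
        exact ⟨hne', by rw [hA, PySem.Dict.get?_insert_of_ne _ _ hkmm]; exact hd'⟩

lemma pvFold_pres (l : List (Int × Int × Int × Int))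
    (d : PySem.Dict (Int × Int) (Int × Int × Int × Int))
    (g : PySem.Dict (Int × Int) (List (Int × Int × Int × Int)))
    (h : pvR d g) : pvR (l.foldl pvStepA d) (l.foldl pvStepB g) := by
  induction l generalizing d g with
  | nil => exact h
  | cons v t ih => exact ih _ _ (pvStep_pres d g h v)

-- ===== VERDICT (by name: the statement is the Claim_ definition above) =====
theorem f_tot_spec : Claim_equal_f_tot := by
  intro versions _
  show f_tot versions = f_tot_alt versions
  obtain ⟨hk, hnd, hget⟩ := pvFold_pres versions PySem.Dict.empty PySem.Dict.empty
    ⟨rfl, by simp [PySem.Dict.keys_empty], fun k gl h => by simp [PySem.Dict.get?_empty] at h⟩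
  have hgn : (versions.foldl pvStepB PySem.Dict.empty).keys.Nodup := hk ▸ hnd
  have halt : f_tot_alt versions =
      ((versions.foldl pvStepB PySem.Dict.empty).items.foldl
        (fun d p => d.insert p.1 (pvMax p.2)) PySem.Dict.empty).values := rfl
  rw [halt]
  have hitems := PySem.Dict.items_foldl_insert_fresh
    (versions.foldl pvStepB PySem.Dict.empty).items Prod.fst (fun p => pvMax p.2)
    PySem.Dict.empty (by intro a _; simp [PySem.Dict.contains_empty]) hgn
  simp only at hitems
  rw [show f_tot versions = (versions.foldl pvStepA PySem.Dict.empty).values from rfl]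
  simp only [PySem.Dict.values]
  rw [hitems]
  simp only [show (PySem.Dict.empty : PySem.Dict (Int × Int) (Int × Int × Int × Int)).items = []
    from rfl, List.nil_append, List.map_map]
  rw [PySem.Dict.items_eq_map_keys _ hgn [], List.map_map]
  rw [PySem.Dict.items_eq_map_keys _ hnd (0, 0, 0, 0), List.map_map, hk]
  apply List.map_congr_left
  intro k hkm
  have hc : (versions.foldl pvStepB PySem.Dict.empty).contains k = true :=
    (PySem.Dict.contains_iff_mem_keys _ _).mpr hkm
  have hsome : ((versions.foldl pvStepB PySem.Dict.empty).get? k).isSome := by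
    rw [← PySem.Dict.contains_eq_isSome_get?]; exact hc
  obtain ⟨gl, hgl⟩ := Option.isSome_iff_exists.mp hsome
  obtain ⟨hne, hd⟩ := hget _ _ hgl
  simp [PySem.Dict.getD_eq_get?_getD, hd, hgl]
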